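-- pv_equiv track=rewrite | github.com/fili/ct-moniteur | src/ct_moniteur/__init__.py | _encode_tile_path
-- ===== SOURCE A (Python) =====
-- def _encode_tile_path(index: int) -> str:
--     """
--     Encode a tile index into the proper path format.
--     Example: 1234567 -> x001/x234/567
--     """
--     if index == 0:
--         return "000"
--
--     groups = []
--     n = index
--     while n > 0:
--         groups.append(n % 1000)
--         n //= 1000
--
--     groups.reverse()
--
--     parts = [f"x{g:03d}" for g in groups[:-1]] + [f"{groups[-1]:03d}"]
--     return "/".join(parts)
-- ===== SOURCE B (Python) =====
-- def _encode_tile_path(index: int) -> str: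
--     s = str(index)
--     s = "0" * (-len(s) % 3) + s
--     chunks = [s[i:i + 3] for i in range(0, len(s), 3)]
--     return "/".join(["x" + c for c in chunks[:-1]] + [chunks[-1]])
-- ===== Notes on version B (the rewrite author's own statement) =====
-- stated objective: alternative
-- what changed: Replaces the %/// base-1000 extraction loop (collect groups, reverse, format each with %03d) with a single str() call, zero-padding the decimal string to a multiple of 3 and slicing it into 3-character chunks.
import Mathlib
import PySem

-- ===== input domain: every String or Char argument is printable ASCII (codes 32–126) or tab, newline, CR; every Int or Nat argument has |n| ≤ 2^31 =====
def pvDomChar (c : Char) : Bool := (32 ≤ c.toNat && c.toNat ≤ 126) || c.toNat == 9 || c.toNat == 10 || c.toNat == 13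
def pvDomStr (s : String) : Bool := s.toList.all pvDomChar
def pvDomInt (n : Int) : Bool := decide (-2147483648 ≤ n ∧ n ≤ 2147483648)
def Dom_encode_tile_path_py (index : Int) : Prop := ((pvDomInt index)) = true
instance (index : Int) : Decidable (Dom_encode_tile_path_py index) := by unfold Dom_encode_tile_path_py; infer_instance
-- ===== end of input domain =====

-- B replaces A's base-1000 %-// extraction loop by zero-padding the decimal string of the
-- index to a multiple of 3 and slicing it into 3-character chunks (alternative decomposition,
-- same cost); equivalence is proved on the nonnegative indices, where A returns (A raises
-- IndexError on negative input).


-- ===== PORT A =====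
-- while n > 0: groups.append(n % 1000); n //= 1000
def encodeLoopA (n : Int) (groups : List Int) : List Int :=
  if h : 0 < n then
    encodeLoopA (PySem.Int.floordiv n 1000) (groups ++ [PySem.Int.mod n 1000])
  else groups
termination_by n.toNat
decreasing_by
  simp only [PySem.Int.floordiv]
  have he : n.fdiv 1000 = n / 1000 := by rw [Int.fdiv_eq_ediv]; simp
  omega

def encode_tile_path_py (index : Int) : String :=
  if index = 0 then "000"
  else
    let groups := encodeLoopA index []
    let groups := groups.reverse
    -- parts = [f"x{g:03d}" for g in groups[:-1]] + [f"{groups[-1]:03d}"]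
    let parts := (PySem.List.slice groups none (some (-1))).map
        (fun g => 'x' :: PySem.Chars.zfill (PySem.Int.toChars g) 3)
      ++ [PySem.Chars.zfill (PySem.Int.toChars (PySem.List.pyGetD groups (-1) 0)) 3]
    String.ofList (PySem.Chars.join ['/'] parts)

-- ===== PORT B =====
def encode_tile_path_py_alt (index : Int) : String :=
  let s := PySem.Int.toChars index
  -- s = "0" * (-len(s) % 3) + s
  let s := List.replicate (PySem.Int.mod (-(s.length : Int)) 3).toNat '0' ++ s
  -- chunks = [s[i:i+3] for i in range(0, len(s), 3)]
  let chunks := (PySem.List.pyRange 0 (s.length : Int) 3).map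
      (fun i => PySem.List.slice s (some i) (some (i + 3)))
  -- "/".join(["x" + c for c in chunks[:-1]] + [chunks[-1]])
  let parts := (PySem.List.slice chunks none (some (-1))).map (fun c => 'x' :: c)
      ++ [PySem.List.pyGetD chunks (-1) []]
  String.ofList (PySem.Chars.join ['/'] parts)

-- ===== PRECONDITION & SPEC =====
-- A raises IndexError (groups[-1] on an empty list) for negative index; Pre_ keeps the inputs A returns on.
def Pre_encode_tile_path_py (index : Int) : Prop := 0 ≤ index
instance (index : Int) : Decidable (Pre_encode_tile_path_py index) := by unfold Pre_encode_tile_path_py; infer_instance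
def pvWitness_encode_tile_path_py : Int := (1234567)

def Spec_encode_tile_path_py (index : Int) (out : String) : Prop := out = encode_tile_path_py_alt index
instance (index : Int) (out : String) : Decidable (Spec_encode_tile_path_py index out) := by unfold Spec_encode_tile_path_py; infer_instance

-- ===== CLAIM (what is proved, stated in full; the proofs are below) =====
def Claim_equal_encode_tile_path_py : Prop := ∀ (index : Int), Dom_encode_tile_path_py index → Pre_encode_tile_path_py index → Spec_encode_tile_path_py index (encode_tile_path_py index)

-- ===== LEMMAS AND PROOFS =====

-- abbreviations used only by the proofs
def td (n : Nat) : List Char := Nat.toDigits 10 n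
def pad3e (g : Nat) : List Char :=
  [Nat.digitChar (g / 100), Nat.digitChar (g / 10 % 10), Nat.digitChar (g % 10)]

-- base-1000 groups of m, most significant first
def G (m : Nat) : List Nat :=
  if m < 1000 then [m] else G (m / 1000) ++ [m % 1000]
termination_by m
decreasing_by omega

lemma tdc_shift (f : Nat) : ∀ (n : Nat) (ds : List Char),
    Nat.toDigitsCore 10 f n ds = Nat.toDigitsCore 10 f n [] ++ ds := by
  induction f with
  | zero => intro n ds; simp [Nat.toDigitsCore]
  | succ f ih =>
    intro n ds
    simp only [Nat.toDigitsCore]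
    by_cases h : n / 10 = 0
    · simp [h]
    · simp only [h]
      rw [ih (n / 10) ((n % 10).digitChar :: ds), ih (n / 10) [(n % 10).digitChar]]
      simp

lemma tdc_fuel (f : Nat) : ∀ (f' n : Nat), n < f → n < f' →
    Nat.toDigitsCore 10 f n [] = Nat.toDigitsCore 10 f' n [] := by
  induction f with
  | zero => intro f' n h; omega
  | succ f ih =>
    intro f' n h h'
    cases f' with
    | zero => omega
    | succ f' =>
      simp only [Nat.toDigitsCore]
      by_cases h0 : n / 10 = 0
      · simp [h0]
      · simp only [h0]
        rw [tdc_shift f, tdc_shift f']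
        rw [ih f' (n / 10) (by omega) (by omega)]

lemma td_small {n : Nat} (h : n < 10) : td n = [Nat.digitChar n] := by
  have h0 : n / 10 = 0 := by omega
  simp [td, Nat.toDigits, Nat.toDigitsCore, h0, Nat.mod_eq_of_lt h]

lemma td_step {n : Nat} (h : 10 ≤ n) :
    td n = td (n / 10) ++ [Nat.digitChar (n % 10)] := by
  have h0 : ¬ n / 10 = 0 := by omega
  show Nat.toDigitsCore 10 (n + 1) n [] = _
  simp only [Nat.toDigitsCore, h0]
  rw [tdc_shift, tdc_fuel n (n / 10 + 1) (n / 10) (by omega) (by omega)]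
  rfl

lemma td_two {n : Nat} (h1 : 10 ≤ n) (h2 : n < 100) :
    td n = [Nat.digitChar (n / 10), Nat.digitChar (n % 10)] := by
  rw [td_step h1, td_small (show n / 10 < 10 by omega)]
  simp

lemma td_three {n : Nat} (h1 : 100 ≤ n) (h2 : n < 1000) :
    td n = pad3e n := by
  rw [td_step (by omega : 10 ≤ n), td_step (show 10 ≤ n / 10 by omega),
    td_small (show n / 10 / 10 < 10 by omega)]
  have e1 : n / 10 / 10 = n / 100 := by omega
  simp [pad3e, e1]

lemma digitChar_ne (d : Nat) : Nat.digitChar d ≠ '+' ∧ Nat.digitChar d ≠ '-' := by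
  by_cases h : d < 16
  · interval_cases d <;> exact ⟨by decide, by decide⟩
  · have hstar : Nat.digitChar d = '*' := by
      unfold Nat.digitChar
      rw [if_neg (show ¬ d = 0 by omega), if_neg (show ¬ d = 1 by omega), if_neg (show ¬ d = 2 by omega), if_neg (show ¬ d = 3 by omega), if_neg (show ¬ d = 4 by omega), if_neg (show ¬ d = 5 by omega), if_neg (show ¬ d = 6 by omega), if_neg (show ¬ d = 7 by omega), if_neg (show ¬ d = 8 by omega), if_neg (show ¬ d = 9 by omega), if_neg (show ¬ d = 10 by omega), if_neg (show ¬ d = 11 by omega), if_neg (show ¬ d = 12 by omega), if_neg (show ¬ d = 13 by omega), if_neg (show ¬ d = 14 by omega), if_neg (show ¬ d = 15 by omega)]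
    rw [hstar]
    exact ⟨by decide, by decide⟩

lemma zfill_td {g : Nat} (h : g < 1000) :
    PySem.Chars.zfill (td g) 3 = pad3e g := by
  by_cases h1 : g < 10
  · rw [td_small h1]
    have := digitChar_ne g
    have hg0 : g / 100 = 0 := by omega
    have hg1 : g / 10 % 10 = 0 := by omega
    have hg2 : g % 10 = g := by omega
    simp [PySem.Chars.zfill, pad3e, hg0, hg1, hg2, this.1, this.2]
    decide
  · by_cases h2 : g < 100
    · rw [td_two (by omega) h2]
      have := digitChar_ne (g / 10)
      have hg0 : g / 100 = 0 := by omega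
      have hg1 : g / 10 % 10 = g / 10 := by omega
      simp [PySem.Chars.zfill, pad3e, hg0, hg1, this.1, this.2]
      decide
    · rw [td_three (by omega) h]
      simp [PySem.Chars.zfill, pad3e]

lemma G_ne_nil (m : Nat) : G m ≠ [] := by
  unfold G
  split <;> simp

lemma G_lt (m : Nat) : ∀ g ∈ G m, g < 1000 := by
  induction m using Nat.strong_induction_on with
  | _ m ih =>
    unfold G
    split
    · intro g hg; simp at hg; omega
    · intro g hg
      simp only [List.mem_append, List.mem_singleton] at hg
      rcases hg with hg | hg
      · exact ih (m / 1000) (by omega) g hg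
      · omega

lemma td_thousand {q r : Nat} (hq : 1 ≤ q) (hr : r < 1000) :
    td (1000 * q + r) = td q ++ pad3e r := by
  have h1 : 10 ≤ 1000 * q + r := by omega
  rw [td_step h1]
  have e1 : (1000 * q + r) / 10 = 100 * q + r / 10 := by omega
  have e2 : (1000 * q + r) % 10 = r % 10 := by omega
  rw [e1, e2, td_step (show 10 ≤ 100 * q + r / 10 by omega)]
  have e3 : (100 * q + r / 10) / 10 = 10 * q + r / 100 := by omega
  have e4 : (100 * q + r / 10) % 10 = r / 10 % 10 := by omega
  rw [e3, e4, td_step (show 10 ≤ 10 * q + r / 100 by omega)]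
  have e5 : (10 * q + r / 100) / 10 = q := by omega
  have e6 : (10 * q + r / 100) % 10 = r / 100 := by omega
  rw [e5, e6]
  simp [pad3e]

lemma td_G (m : Nat) (hm : 1 ≤ m) : ∀ {g0 : Nat} {gs : List Nat}, G m = g0 :: gs →
    td m = td g0 ++ (gs.map pad3e).flatten := by
  induction m using Nat.strong_induction_on with
  | _ m ih =>
    intro g0 gs hG
    by_cases h : m < 1000
    · unfold G at hG
      rw [if_pos h] at hG
      cases hG
      simp
    · unfold G at hG
      rw [if_neg h] at hG
      obtain ⟨g0', gs', hG'⟩ := List.exists_cons_of_ne_nil (G_ne_nil (m / 1000))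
      rw [hG'] at hG
      simp only [List.cons_append] at hG
      obtain ⟨rfl, rfl⟩ : g0' = g0 ∧ gs' ++ [m % 1000] = gs := by
        exact ⟨(List.cons.injEq ..).mp hG |>.1, (List.cons.injEq ..).mp hG |>.2⟩
      have hrec : td m = td (m / 1000) ++ pad3e (m % 1000) := by
        have := td_thousand (q := m / 1000) (r := m % 1000) (by omega) (by omega)
        rw [show 1000 * (m / 1000) + m % 1000 = m by omega] at this
        exact this
      rw [hrec, ih (m / 1000) (by omega) (by omega) hG']
      simp

lemma flatten_len3 : ∀ gs : List Nat, ((gs.map pad3e).flatten).length = 3 * gs.length := by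
  intro gs
  induction gs with
  | nil => simp
  | cons a l ihl =>
    simp only [List.map_cons, List.flatten_cons, List.length_append, ihl, List.length_cons]
    simp [pad3e]; omega

lemma td_len_G (m : Nat) (hm : 1 ≤ m) {g0 : Nat} {gs : List Nat} (hG : G m = g0 :: gs) :
    (td m).length = (td g0).length + 3 * gs.length := by
  rw [td_G m hm hG]
  simp only [List.length_append]
  congr 1
  exact flatten_len3 gs

lemma td_len_small {g : Nat} (h : g < 1000) :
    1 ≤ (td g).length ∧ (td g).length ≤ 3 := by
  by_cases h1 : g < 10
  · rw [td_small h1]; simp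
  · by_cases h2 : g < 100
    · rw [td_two (by omega) h2]; simp
    · rw [td_three (by omega) h]; simp [pad3e]

-- the chunking loop of B recovers the list of 3-character blocks
lemma chunks_flatten : ∀ (ps : List (List Char)), (∀ c ∈ ps, c.length = 3) →
    (List.range ps.length).map
      (fun j => ((ps.flatten).drop (3 * j)).take 3) = ps := by
  intro ps
  induction ps with
  | nil => intro _; simp
  | cons c ps ih =>
    intro h3
    have hc : c.length = 3 := h3 c (by simp)
    simp only [List.length_cons, List.range_succ_eq_map, List.map_cons, List.map_map]
    congr 1
    · simp only [Nat.mul_zero, List.drop_zero, List.flatten_cons]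
      rw [List.take_append_of_le_length (by omega)]
      rw [← hc, List.take_length]
    · calc List.map ((fun j => ((( c :: ps).flatten).drop (3 * j)).take 3) ∘ Nat.succ)
            (List.range ps.length)
          = List.map (fun j => ((ps.flatten).drop (3 * j)).take 3) (List.range ps.length) := by
            apply List.map_congr_left
            intro j _
            simp only [Function.comp_apply, List.flatten_cons]
            have h31 : 3 * (j + 1) = c.length + 3 * j := by omega
            rw [Nat.succ_eq_add_one, h31, List.drop_length_add_append]
        _ = ps := ih (fun d hd => h3 d (by simp [hd]))

lemma flatten_len3' : ∀ (ps : List (List Char)), (∀ c ∈ ps, c.length = 3) →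
    (ps.flatten).length = 3 * ps.length := by
  intro ps
  induction ps with
  | nil => intro _; simp
  | cons c l ihl =>
    intro h3
    simp only [List.flatten_cons, List.length_append, List.length_cons,
      ihl (fun d hd => h3 d (by simp [hd]))]
    have := h3 c (by simp)
    omega

lemma pyRange_three (t : Nat) (ht : 1 ≤ t) :
    PySem.List.pyRange 0 ((3 * t : Nat) : Int) 3 =
      (List.range t).map (fun k => ((3 * k : Nat) : Int)) := by
  rw [PySem.List.pyRange_of_pos 0 ((3 * t : Nat) : Int) (by norm_num)]
  have hlt : (0 : Int) < ((3 * t : Nat) : Int) := by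
    push_cast; omega
  rw [if_pos hlt]
  have : ((((3 * t : Nat) : Int) - 0 + 3 - 1) / 3).toNat = t := by omega
  rw [this]
  apply List.map_congr_left
  intro k _
  push_cast; ring

-- B's chunks over a flattened list of 3-blocks
lemma chunks_slice (ps : List (List Char)) (h3 : ∀ c ∈ ps, c.length = 3) (hne : ps ≠ []) :
    (PySem.List.pyRange 0 ((ps.flatten).length : Int) 3).map
      (fun i => PySem.List.slice ps.flatten (some i) (some (i + 3))) = ps := by
  have hlen : (ps.flatten).length = 3 * ps.length := flatten_len3' ps h3
  rw [hlen, pyRange_three ps.length (by cases ps <;> simp_all), List.map_map]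
  calc List.map ((fun i => PySem.List.slice ps.flatten (some i) (some (i + 3))) ∘
          fun k => ((3 * k : Nat) : Int)) (List.range ps.length)
      = List.map (fun j => ((ps.flatten).drop (3 * j)).take 3) (List.range ps.length) := by
        apply List.map_congr_left
        intro j _
        simp only [Function.comp_apply]
        have h33 : ((3 * j : Nat) : Int) + 3 = ((3 * j : Nat) : Int) + ((3 : Nat) : Int) := by
          norm_num
        rw [h33, PySem.List.slice_natCast_add]
    _ = ps := chunks_flatten ps h3

lemma pad_td {g : Nat} (h : g < 1000) :
    List.replicate (3 - (td g).length) '0' ++ td g = pad3e g := by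
  by_cases h1 : g < 10
  · rw [td_small h1]
    have hg0 : g / 100 = 0 := by omega
    have hg1 : g / 10 % 10 = 0 := by omega
    have hg2 : g % 10 = g := by omega
    simp [pad3e, hg0, hg1, hg2]
    decide
  · by_cases h2 : g < 100
    · rw [td_two (by omega) h2]
      have hg0 : g / 100 = 0 := by omega
      have hg1 : g / 10 % 10 = g / 10 := by omega
      simp [pad3e, hg0, hg1]
      decide
    · rw [td_three (by omega) h]
      simp [pad3e]

lemma toChars_natCast (g : Nat) : PySem.Int.toChars (g : Int) = td g := by
  simp [PySem.Int.toChars, td]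

lemma length_pad3e (g : Nat) : (pad3e g).length = 3 := by simp [pad3e]

lemma floordiv_thousand (n : Int) : PySem.Int.floordiv n 1000 = n / 1000 := by
  show Int.fdiv n 1000 = n / 1000
  rw [Int.fdiv_eq_ediv]
  simp

lemma mod_thousand (n : Int) : PySem.Int.mod n 1000 = n % 1000 := by
  show Int.fmod n 1000 = n % 1000
  rw [Int.fmod_eq_emod]
  simp

lemma mod_three (a : Int) : PySem.Int.mod a 3 = a % 3 := by
  show Int.fmod a 3 = a % 3
  rw [Int.fmod_eq_emod]
  simp

lemma loopA_spec : ∀ (m : Nat) (n : Int), 0 < n → n.toNat = m → ∀ gs : List Int,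
    encodeLoopA n gs = gs ++ (((G m).map (fun g : Nat => (g : Int))).reverse) := by
  intro m
  induction m using Nat.strong_induction_on with
  | _ m ih =>
    intro n hn hm gs
    rw [encodeLoopA, dif_pos hn, floordiv_thousand, mod_thousand]
    by_cases hlt : n < 1000
    · have h0 : n / 1000 = 0 := by omega
      rw [h0, encodeLoopA, dif_neg (by omega)]
      have hG : G m = [m] := by unfold G; rw [if_pos (by omega)]
      rw [hG]
      have : n % 1000 = n := by omega
      rw [this]
      simp
      omega
    · have hq : 0 < n / 1000 := by omega
      rw [ih ((n / 1000).toNat) (by omega) (n / 1000) hq rfl]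
      have hG : G m = G (m / 1000) ++ [m % 1000] := by
        conv_lhs => rw [G]
        rw [if_neg (by omega)]
      have hq' : (n / 1000).toNat = m / 1000 := by omega
      rw [hG, hq', List.map_append, List.reverse_append]
      have : n % 1000 = ((m % 1000 : Nat) : Int) := by omega
      rw [this]
      simp

-- ===== VERDICT (by name: the statement is the Claim_ definition above) =====
theorem encode_tile_path_py_spec : Claim_equal_encode_tile_path_py := by
  unfold Claim_equal_encode_tile_path_py
  intro index _ hpre
  unfold Spec_encode_tile_path_py Pre_encode_tile_path_py at *
  by_cases h0 : index = 0
  · subst h0; decide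
  · have hpos : 0 < index := by omega
    set m := index.toNat with hmdef
    have hm : 1 ≤ m := by omega
    obtain ⟨g0, gs, hG⟩ := List.exists_cons_of_ne_nil (G_ne_nil m)
    have hglt : ∀ g ∈ g0 :: gs, g < 1000 := by rw [← hG]; exact G_lt m
    have hmem_last : (g0 :: gs).getLast (by simp) ∈ g0 :: gs := List.getLast_mem _
    -- A side
    have hloop : encodeLoopA index [] = ((G m).map (fun g : Nat => (g : Int))).reverse := by
      rw [loopA_spec m index hpos rfl []]; simp
    have hA : encode_tile_path_py index =
        String.ofList (PySem.Chars.join ['/']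
          (((g0 :: gs).dropLast).map (fun g => 'x' :: pad3e g) ++
            [pad3e ((g0 :: gs).getLast (by simp))])) := by
      rw [encode_tile_path_py, if_neg h0]
      simp only [hloop, List.reverse_reverse, hG]
      rw [PySem.List.slice_to_neg_one,
        PySem.List.pyGetD_neg_one _ _ (by simp)]
      rw [← List.map_dropLast, List.map_map,
        List.getLast_map (by simp)]
      have h1 : List.map ((fun g => 'x' :: PySem.Chars.zfill (PySem.Int.toChars g) 3) ∘
            fun g : Nat => (g : Int)) (g0 :: gs).dropLast
          = List.map (fun g => 'x' :: pad3e g) (g0 :: gs).dropLast := by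
        apply List.map_congr_left
        intro g hg
        have : g < 1000 := hglt g (List.dropLast_subset _ hg)
        simp only [Function.comp_apply, toChars_natCast, zfill_td this]
      rw [h1, toChars_natCast, zfill_td (hglt _ hmem_last)]
    -- B side
    have hs : PySem.Int.toChars index = td m := by
      rw [show index = ((m : Nat) : Int) by omega, toChars_natCast]
    have hlen3 : ∀ c ∈ (g0 :: gs).map pad3e, c.length = 3 := by
      intro c hc
      obtain ⟨g, _, rfl⟩ := List.mem_map.mp hc
      exact length_pad3e g
    have hlenG : (td m).length = (td g0).length + 3 * gs.length := td_len_G m hm hG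
    have hg0len : 1 ≤ (td g0).length ∧ (td g0).length ≤ 3 :=
      td_len_small (hglt g0 (by simp))
    have hk : (PySem.Int.mod (-((td m).length : Int)) 3).toNat = 3 - (td g0).length := by
      rw [mod_three]
      omega
    have hpadded : List.replicate (PySem.Int.mod (-((td m).length : Int)) 3).toNat '0' ++ td m
        = ((g0 :: gs).map pad3e).flatten := by
      rw [hk, td_G m hm hG, List.map_cons, List.flatten_cons, ← List.append_assoc]
      congr 1
      exact pad_td (hglt g0 (by simp))
    have hB : encode_tile_path_py_alt index =
        String.ofList (PySem.Chars.join ['/']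
          (((g0 :: gs).dropLast).map (fun g => 'x' :: pad3e g) ++
            [pad3e ((g0 :: gs).getLast (by simp))])) := by
      rw [encode_tile_path_py_alt]
      simp only [hs, hpadded]
      rw [chunks_slice _ hlen3 (by simp)]
      rw [PySem.List.slice_to_neg_one,
        PySem.List.pyGetD_neg_one _ _ (by simp)]
      rw [← List.map_dropLast, List.map_map,
        List.getLast_map (by simp)]
      simp only [Function.comp_def]
    rw [hA, hB]
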